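-- pv_equiv track=rewrite | github.com/YichaoOU/HemTools | bin/crispressoPooled_PE_edit_frequency.py | PE_indel_sub
-- ===== SOURCE A (Python) =====
-- def PE_indel_sub(aligned_read,aligned_ref,gRNA_pos_in_ref,gRNA,RTT,cas9_cut):
-- 	# aligned_read="GTGAAGCCAGC-ACCTCAATTCCTGCCTCCTCAGAAGAGAGAATTTGACCAA"
-- 	# aligned_ref ="GTGAAGCCAGCAACCTCA-TTCCTGCCAGCTCAGAAGAGAGAATTTGACCAA"
-- 	# ref=          "GTGAAGCCAGCAACCTCATTCCTGCCAGCTCAGAAGAGAGAATTTGACCAA"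
-- 	# gRNA="AGCAACCTCATTCCTGCCAG"
-- 	# RTT="CTCCTCAGA"
-- 	# cas9_cut=-3
-- 	# aim to get aligned gRNA , aligned RTT, and gRNA_cut_in_aligned
--
-- 	aligned_gRNA=[]
-- 	aligned_RTT=[]
-- 	gRNA_cut_in_aligned=-1
--
-- 	# make sure gRNA is found in ref
-- 	# try:
-- 		# gRNA_pos_in_ref=ref.index(gRNA) # 0-index
-- 		# to speed up, let user input the index
-- 		# and doing the check outside this function
-- 	# except:
-- 		# print
--
-- 	aligned_pos=0
-- 	ref_pos=-1
--
-- 	gRNA_end_in_ref = gRNA_pos_in_ref+len(gRNA) # 1-index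
-- 	gRNA_cut_in_ref = gRNA_end_in_ref+cas9_cut # 1-index
-- 	gRNA_cut_in_ref_flag = True
-- 	for i in range(len(aligned_ref)):
-- 		if aligned_ref[i]=="-":
-- 			aligned_gRNA.append("-")
-- 		else:
-- 			ref_pos+=1
-- 			if gRNA_end_in_ref>ref_pos>=gRNA_pos_in_ref:
-- 				aligned_gRNA.append(aligned_ref[i])
-- 				if ref_pos==gRNA_cut_in_ref and gRNA_cut_in_ref_flag:
-- 					gRNA_cut_in_ref_flag=False
-- 					gRNA_cut_in_aligned=i
-- 			else:
-- 				aligned_gRNA.append("-")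
-- 	# print (gRNA_cut_in_aligned)
-- 	is_indel=False
-- 	is_sub=False # first mismatch
-- 	if "-" in [aligned_gRNA[gRNA_cut_in_aligned-1],aligned_gRNA[gRNA_cut_in_aligned],aligned_read[gRNA_cut_in_aligned-1],aligned_read[gRNA_cut_in_aligned]]:
-- 		is_indel=True
--
-- 	if not is_indel: # check sub
-- 		for i in range(len(RTT)):
-- 			read_base = aligned_read[gRNA_cut_in_aligned+i]
-- 			ref_base = aligned_ref[gRNA_cut_in_aligned+i]
-- 			RTT_base = RTT[i]
-- 			if ref_base!=RTT_base: # first mismatch, if not the RTT base, this mutation is not caused by PE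
-- 				if read_base==RTT_base:
-- 					is_sub=True
-- 					# print (read_base,ref_base,RTT_base,i)
-- 				break
-- 	return is_indel,is_sub,gRNA_cut_in_aligned,''.join(aligned_gRNA)
-- ===== SOURCE B (Python) =====
-- def PE_indel_sub(aligned_read, aligned_ref, gRNA_pos_in_ref, gRNA, RTT, cas9_cut):
--     gRNA_end_in_ref = gRNA_pos_in_ref + len(gRNA)
--     gRNA_cut_in_ref = gRNA_end_in_ref + cas9_cut
--     # alignment column of each reference position (index table)
--     ref_to_aligned = [i for i, ch in enumerate(aligned_ref) if ch != "-"]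
--     gRNA_cut_in_aligned = -1
--     if gRNA_pos_in_ref <= gRNA_cut_in_ref < gRNA_end_in_ref and 0 <= gRNA_cut_in_ref < len(ref_to_aligned):
--         gRNA_cut_in_aligned = ref_to_aligned[gRNA_cut_in_ref]
--     lo = max(gRNA_pos_in_ref, 0)
--     hi = max(gRNA_end_in_ref, 0)
--     cols = set(ref_to_aligned[lo:hi])
--     aligned_gRNA = "".join(ch if i in cols else "-" for i, ch in enumerate(aligned_ref))
--     c = gRNA_cut_in_aligned
--     near = (aligned_gRNA[c - 1], aligned_gRNA[c], aligned_read[c - 1], aligned_read[c])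
--     is_indel = "-" in near
--     is_sub = False
--     if not is_indel:
--         for i, rb in enumerate(RTT):
--             if aligned_ref[c + i] != rb:
--                 is_sub = aligned_read[c + i] == rb
--                 break
--     return is_indel, is_sub, gRNA_cut_in_aligned, aligned_gRNA
-- ===== Notes on version B (the rewrite author's own statement) =====
-- stated objective: alternative
-- what changed: A's single stateful scan (running ref position, cut-found flag) is replaced by an index table ref_to_aligned mapping each reference position to its alignment column: the cut column becomes one guarded table lookup and the aligned gRNA a per-column membership map against a set built from a slice of the table; the indel/substitution detection block is kept.
import Mathlib
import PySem

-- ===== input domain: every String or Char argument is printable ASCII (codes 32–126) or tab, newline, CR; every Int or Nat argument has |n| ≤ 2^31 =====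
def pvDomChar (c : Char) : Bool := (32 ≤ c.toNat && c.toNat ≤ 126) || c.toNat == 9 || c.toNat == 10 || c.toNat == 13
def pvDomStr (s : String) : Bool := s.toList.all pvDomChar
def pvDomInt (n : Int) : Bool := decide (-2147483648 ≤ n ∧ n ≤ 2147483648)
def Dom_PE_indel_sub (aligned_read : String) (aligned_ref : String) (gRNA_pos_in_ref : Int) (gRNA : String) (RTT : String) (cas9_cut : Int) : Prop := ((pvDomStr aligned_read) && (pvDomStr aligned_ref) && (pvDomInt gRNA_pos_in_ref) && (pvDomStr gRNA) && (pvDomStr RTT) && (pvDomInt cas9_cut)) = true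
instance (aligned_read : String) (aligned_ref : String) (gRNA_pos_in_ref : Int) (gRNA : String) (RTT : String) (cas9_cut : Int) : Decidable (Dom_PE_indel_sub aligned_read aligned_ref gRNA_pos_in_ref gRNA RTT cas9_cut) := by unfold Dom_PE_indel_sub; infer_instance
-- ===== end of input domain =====

-- B replaces A's single stateful scan by an index table (ref position -> alignment column):
-- the cut column is one table lookup and the aligned gRNA is a per-column map over a slice of
-- the table; the indel/sub detection is kept.  Objective: alternative decomposition.

-- ===== PORT A =====
def pvStepA (pos gEnd gCut : Int) (st : List Char × Int × Int × Bool) (p : Int × Char) :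
    List Char × Int × Int × Bool :=
  if p.2 = '-' then (st.1 ++ ['-'], st.2.1, st.2.2.1, st.2.2.2)
  else
    let r := st.2.2.1 + 1
    if gEnd > r ∧ r ≥ pos then
      (if r = gCut ∧ st.2.2.2 then (st.1 ++ [p.2], p.1, r, false)
       else (st.1 ++ [p.2], st.2.1, r, st.2.2.2))
    else (st.1 ++ ['-'], st.2.1, r, st.2.2.2)

def pvSubA (readL refL : List Char) : List Char → Int → Bool
  | [], _ => false
  | rb :: rest, j =>
    let read_base := PySem.List.pyGetD readL j '?'
    let ref_base := PySem.List.pyGetD refL j '?'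
    if ref_base ≠ rb then read_base == rb else pvSubA readL refL rest (j + 1)

def PE_indel_sub (aligned_read : String) (aligned_ref : String) (gRNA_pos_in_ref : Int)
    (gRNA : String) (RTT : String) (cas9_cut : Int) : Bool × Bool × Int × String :=
  let readL := aligned_read.toList
  let refL := aligned_ref.toList
  let gEnd := gRNA_pos_in_ref + (gRNA.toList.length : Int)
  let gCut := gEnd + cas9_cut
  let st := (PySem.List.enumerate refL 0).foldl (pvStepA gRNA_pos_in_ref gEnd gCut)
      ([], -1, -1, true)
  let g := st.1
  let c := st.2.1
  let is_indel := [PySem.List.pyGetD g (c - 1) '?', PySem.List.pyGetD g c '?',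
      PySem.List.pyGetD readL (c - 1) '?', PySem.List.pyGetD readL c '?'].contains '-'
  let is_sub := if is_indel then false else pvSubA readL refL RTT.toList c
  (is_indel, is_sub, c, String.ofList g)

-- ===== PORT B =====
def pvSubB (readL refL : List Char) (c : Int) : List (Int × Char) → Bool
  | [] => false
  | p :: rest =>
    if PySem.List.pyGetD refL (c + p.1) '?' ≠ p.2 then
      PySem.List.pyGetD readL (c + p.1) '?' == p.2
    else pvSubB readL refL c rest

def PE_indel_sub_alt (aligned_read : String) (aligned_ref : String) (gRNA_pos_in_ref : Int)
    (gRNA : String) (RTT : String) (cas9_cut : Int) : Bool × Bool × Int × String :=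
  let readL := aligned_read.toList
  let refL := aligned_ref.toList
  let gEnd := gRNA_pos_in_ref + (gRNA.toList.length : Int)
  let gCut := gEnd + cas9_cut
  let rta := ((PySem.List.enumerate refL 0).filter (fun q => q.2 != '-')).map (fun q => q.1)
  let c : Int := if gRNA_pos_in_ref ≤ gCut ∧ gCut < gEnd ∧ 0 ≤ gCut ∧ gCut < (rta.length : Int)
      then PySem.List.pyGetD rta gCut 0 else -1
  let cols := PySem.Set.ofList (PySem.List.slice rta (some (max gRNA_pos_in_ref 0)) (some (max gEnd 0)))
  let g := (PySem.List.enumerate refL 0).map (fun p => if p.1 ∈ cols then p.2 else '-')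
  let is_indel := [PySem.List.pyGetD g (c - 1) '?', PySem.List.pyGetD g c '?',
      PySem.List.pyGetD readL (c - 1) '?', PySem.List.pyGetD readL c '?'].contains '-'
  let is_sub := if is_indel then false else pvSubB readL refL c (PySem.List.enumerate RTT.toList 0)
  (is_indel, is_sub, c, String.ofList g)

-- ===== PRECONDITION & SPEC =====
-- helpers used by Pre_ only (closed-form descriptions, independent of both ports)
def pvRefCols : List Char → Int → List Int
  | [], _ => []
  | ch :: t, s => if ch = '-' then pvRefCols t (s + 1) else s :: pvRefCols t (s + 1)

def pvCutCol (refL : List Char) (pos gEnd gCut : Int) : Int :=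
  if pos ≤ gCut ∧ gCut < gEnd ∧ 0 ≤ gCut ∧ gCut < (refL.countP (fun x => x != '-') : Int)
  then PySem.List.pyGetD (pvRefCols refL 0) gCut 0 else -1

-- the aligned-gRNA character at (python-normalized) index j
def pvGA (refL : List Char) (pos gEnd : Int) (j : Int) : Char :=
  let jn := (if j < 0 then j + (refL.length : Int) else j).toNat
  let ch := refL.getD jn '?'
  let r : Int := ((refL.take jn).countP (fun x => x != '-') : Int)
  if ch ≠ '-' ∧ pos ≤ r ∧ r < gEnd then ch else '-'

def pvPreAux (readL refL rttL : List Char) (pos gEnd c : Int) : Prop :=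
  (-(refL.length : Int) ≤ c - 1 ∧ c < refL.length ∧
   -(readL.length : Int) ≤ c - 1 ∧ c < readL.length) ∧
  ('-' ∈ [pvGA refL pos gEnd (c - 1), pvGA refL pos gEnd c,
          PySem.List.pyGetD readL (c - 1) '?', PySem.List.pyGetD readL c '?'] ∨
   ∀ i : Nat, i < rttL.length →
     (∀ j : Nat, j < i →
        (-(refL.length : Int) ≤ c + j ∧ c + j < refL.length ∧
         -(readL.length : Int) ≤ c + j ∧ c + j < readL.length ∧
         PySem.List.pyGetD refL (c + (j : Int)) '?' = rttL.getD j '?')) →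
     (-(refL.length : Int) ≤ c + i ∧ c + i < refL.length ∧
      -(readL.length : Int) ≤ c + i ∧ c + i < readL.length))

-- Pre_: exactly the inputs on which the Python A returns (no IndexError): the four accesses
-- next to the cut column are in range and, unless the '-'-check fires, each substitution-loop
-- access made before the first reference/RTT mismatch is in range.
def Pre_PE_indel_sub (aligned_read : String) (aligned_ref : String) (gRNA_pos_in_ref : Int)
    (gRNA : String) (RTT : String) (cas9_cut : Int) : Prop :=
  pvPreAux aligned_read.toList aligned_ref.toList RTT.toList gRNA_pos_in_ref
    (gRNA_pos_in_ref + (gRNA.toList.length : Int))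
    (pvCutCol aligned_ref.toList gRNA_pos_in_ref (gRNA_pos_in_ref + (gRNA.toList.length : Int))
      (gRNA_pos_in_ref + (gRNA.toList.length : Int) + cas9_cut))

instance (aligned_read : String) (aligned_ref : String) (gRNA_pos_in_ref : Int) (gRNA : String)
    (RTT : String) (cas9_cut : Int) :
    Decidable (Pre_PE_indel_sub aligned_read aligned_ref gRNA_pos_in_ref gRNA RTT cas9_cut) := by
  unfold Pre_PE_indel_sub pvPreAux; infer_instance

def pvWitness_PE_indel_sub : String × String × Int × String × String × Int :=
  ("ACGT", "ACGT", 0, "ACGT", "", -2)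

def Spec_PE_indel_sub (aligned_read : String) (aligned_ref : String) (gRNA_pos_in_ref : Int) (gRNA : String) (RTT : String) (cas9_cut : Int) (out : Bool × Bool × Int × String) : Prop := out = PE_indel_sub_alt aligned_read aligned_ref gRNA_pos_in_ref gRNA RTT cas9_cut
instance (aligned_read : String) (aligned_ref : String) (gRNA_pos_in_ref : Int) (gRNA : String) (RTT : String) (cas9_cut : Int) (out : Bool × Bool × Int × String) : Decidable (Spec_PE_indel_sub aligned_read aligned_ref gRNA_pos_in_ref gRNA RTT cas9_cut out) := by unfold Spec_PE_indel_sub; infer_instance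

-- ===== CLAIM (what is proved, stated in full; the proofs are below) =====
def Claim_equal_PE_indel_sub : Prop := ∀ (aligned_read : String) (aligned_ref : String) (gRNA_pos_in_ref : Int) (gRNA : String) (RTT : String) (cas9_cut : Int), Dom_PE_indel_sub aligned_read aligned_ref gRNA_pos_in_ref gRNA RTT cas9_cut → Pre_PE_indel_sub aligned_read aligned_ref gRNA_pos_in_ref gRNA RTT cas9_cut → Spec_PE_indel_sub aligned_read aligned_ref gRNA_pos_in_ref gRNA RTT cas9_cut (PE_indel_sub aligned_read aligned_ref gRNA_pos_in_ref gRNA RTT cas9_cut)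

-- ===== LEMMAS AND PROOFS =====
-- canonical forms of A's loop
def pvEmit (pos gEnd : Int) : List Char → Int → List Char
  | [], _ => []
  | ch :: t, r =>
    if ch = '-' then '-' :: pvEmit pos gEnd t r
    else (if pos ≤ r + 1 ∧ r + 1 < gEnd then ch else '-') :: pvEmit pos gEnd t (r + 1)

def pvFcut (pos gEnd gCut : Int) : List Char → Int → Int → Option Int
  | [], _, _ => none
  | ch :: t, s, r =>
    if ch = '-' then pvFcut pos gEnd gCut t (s + 1) r
    else if r + 1 = gCut ∧ pos ≤ r + 1 ∧ r + 1 < gEnd then some s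
    else pvFcut pos gEnd gCut t (s + 1) (r + 1)

-- window version of pvEmit with Nat countdown bounds
def pvEmitW : List Char → Nat → Nat → List Char
  | [], _, _ => []
  | ch :: t, a, b =>
    if ch = '-' then '-' :: pvEmitW t a b
    else (if a = 0 ∧ 0 < b then ch else '-') :: pvEmitW t (a - 1) (b - 1)

lemma foldA_false (pos gEnd gCut : Int) (t : List Char) :
    ∀ (s : Int) (g : List Char) (cutA r : Int),
    (PySem.List.enumerate t s).foldl (pvStepA pos gEnd gCut) (g, cutA, r, false)
      = (g ++ pvEmit pos gEnd t r, cutA, r + (t.countP (fun x => x != '-') : Int), false) := by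
  induction t with
  | nil => intro s g cutA r; simp [PySem.List.enumerate_nil, pvEmit]
  | cons ch t ih =>
    intro s g cutA r
    rw [PySem.List.enumerate_cons]
    simp only [List.foldl_cons]
    by_cases h : ch = '-'
    · simp [pvStepA, h, pvEmit, ih, List.countP_cons]
    · by_cases hw : gEnd > r + 1 ∧ r + 1 ≥ pos
      · simp [pvStepA, h, hw, pvEmit, ih]
        omega
      · simp [pvStepA, h, hw, pvEmit, ih]
        constructor
        · intro h1 h2; exact (hw ⟨h2, h1⟩).elim
        · omega

lemma foldA_true (pos gEnd gCut : Int) (t : List Char) :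
    ∀ (s : Int) (g : List Char) (cutA r : Int),
    (PySem.List.enumerate t s).foldl (pvStepA pos gEnd gCut) (g, cutA, r, true)
      = (g ++ pvEmit pos gEnd t r, (pvFcut pos gEnd gCut t s r).getD cutA,
         r + (t.countP (fun x => x != '-') : Int), (pvFcut pos gEnd gCut t s r).isNone) := by
  induction t with
  | nil => intro s g cutA r; simp [PySem.List.enumerate_nil, pvEmit, pvFcut]
  | cons ch t ih =>
    intro s g cutA r
    rw [PySem.List.enumerate_cons]
    simp only [List.foldl_cons]
    by_cases h : ch = '-'
    · simp [pvStepA, h, pvEmit, pvFcut, ih]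
    · by_cases hw : gEnd > r + 1 ∧ r + 1 ≥ pos
      · by_cases hc : r + 1 = gCut
        · have hstep : pvStepA pos gEnd gCut (g, cutA, r, true) (s, ch)
              = (g ++ [ch], s, r + 1, false) := by
            simp [pvStepA, h, hw, hc]; omega
          rw [hstep, foldA_false pos gEnd gCut t]
          have hcc : r + 1 = gCut ∧ pos ≤ r + 1 ∧ r + 1 < gEnd := ⟨hc, hw.2, hw.1⟩
          have hpg : pos ≤ gCut ∧ gCut < gEnd := by omega
          simp [pvEmit, pvFcut, h, hcc, hpg]
          omega
        · have hstep : pvStepA pos gEnd gCut (g, cutA, r, true) (s, ch)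
              = (g ++ [ch], cutA, r + 1, true) := by
            simp [pvStepA, h, hw, hc]
          rw [hstep, ih]
          have hne : ¬(r + 1 = gCut ∧ pos ≤ r + 1 ∧ r + 1 < gEnd) := fun hcc => hc hcc.1
          simp [pvEmit, pvFcut, h, hne]
          refine ⟨⟨?_, ?_⟩, ?_⟩ <;> omega
      · have hstep : pvStepA pos gEnd gCut (g, cutA, r, true) (s, ch)
            = (g ++ ['-'], cutA, r + 1, true) := by
          simp [pvStepA, h, hw]
        rw [hstep, ih]
        have hne : ¬(r + 1 = gCut ∧ pos ≤ r + 1 ∧ r + 1 < gEnd) :=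
          fun hcc => hw ⟨hcc.2.2, hcc.2.1⟩
        simp [pvEmit, pvFcut, h, hne]
        constructor
        · intro h1 h2; exact (hw ⟨h2, h1⟩).elim
        · omega

lemma rta_eq (t : List Char) : ∀ s : Int,
    ((PySem.List.enumerate t s).filter (fun q => q.2 != '-')).map (fun q => q.1)
      = pvRefCols t s := by
  induction t with
  | nil => intro s; simp [PySem.List.enumerate_nil, pvRefCols]
  | cons ch t ih =>
    intro s
    rw [PySem.List.enumerate_cons]
    by_cases h : ch = '-' <;> simp [h, pvRefCols, ih]

lemma len_refCols (t : List Char) : ∀ s : Int,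
    (pvRefCols t s).length = t.countP (fun x => x != '-') := by
  induction t with
  | nil => intro s; simp [pvRefCols]
  | cons ch t ih =>
    intro s
    by_cases h : ch = '-' <;> simp [h, pvRefCols, ih, List.countP_cons]

lemma refCols_ge (t : List Char) : ∀ (s : Int), ∀ x ∈ pvRefCols t s, s ≤ x := by
  induction t with
  | nil => intro s x hx; simp [pvRefCols] at hx
  | cons ch t ih =>
    intro s x hx
    by_cases h : ch = '-'
    · simp [pvRefCols, h] at hx
      have := ih (s + 1) x hx; omega
    · simp [pvRefCols, h] at hx
      rcases hx with rfl | hx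
      · omega
      · have := ih (s + 1) x hx; omega

lemma pyGetD_cons_pos {α : Type} (x : α) (xs : List α) (i : Int) (h : 1 ≤ i) (d : α) :
    PySem.List.pyGetD (x :: xs) i d = PySem.List.pyGetD xs (i - 1) d := by
  simp only [PySem.List.pyGetD, PySem.List.pyGet?, PySem.List.pyIdx?, List.length_cons]
  rw [if_pos (by omega : (0:Int) ≤ i), if_pos (by omega : (0:Int) ≤ i - 1)]
  by_cases hi : i < (xs.length : Int) + 1
  · rw [if_pos (by push_cast; omega), if_pos (by omega)]
    simp only [Option.bind_some]
    have : i.toNat = (i-1).toNat + 1 := by omega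
    rw [this]
    simp
  · rw [if_neg (by push_cast; omega), if_neg (by omega)]
    simp

lemma fcut_eq (pos gEnd gCut : Int) (t : List Char) : ∀ (s r : Int),
    pvFcut pos gEnd gCut t s r
      = if pos ≤ gCut ∧ gCut < gEnd ∧ r < gCut ∧ gCut ≤ r + (t.countP (fun x => x != '-') : Int)
        then some (PySem.List.pyGetD (pvRefCols t s) (gCut - r - 1) 0) else none := by
  induction t with
  | nil =>
    intro s r
    rw [if_neg (by rintro ⟨h1, h2, h3, h4⟩; simp [List.countP_nil] at h4; omega)]
    rfl
  | cons ch t ih =>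
    intro s r
    by_cases h : ch = '-'
    · rw [show pvFcut pos gEnd gCut (ch :: t) s r = pvFcut pos gEnd gCut t (s + 1) r from by
        simp [pvFcut, h], ih]
      simp [pvRefCols, h, List.countP_cons]
    · have hcnt2 : (ch :: t).countP (fun x => x != '-') = t.countP (fun x => x != '-') + 1 := by
        simp [List.countP_cons, h]
      by_cases hcc : r + 1 = gCut ∧ pos ≤ r + 1 ∧ r + 1 < gEnd
      · rw [show pvFcut pos gEnd gCut (ch :: t) s r = some s from by
          rw [show pvFcut pos gEnd gCut (ch :: t) s r
              = if ch = '-' then pvFcut pos gEnd gCut t (s + 1) r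
                else if r + 1 = gCut ∧ pos ≤ r + 1 ∧ r + 1 < gEnd then some s
                else pvFcut pos gEnd gCut t (s + 1) (r + 1) from rfl]
          rw [if_neg h, if_pos hcc]]
        have hcond : pos ≤ gCut ∧ gCut < gEnd ∧ r < gCut ∧
            gCut ≤ r + ((ch :: t).countP (fun x => x != '-') : Int) := by
          rw [hcnt2]; push_cast; omega
        rw [if_pos hcond, show gCut - r - 1 = (0 : Int) from by omega]
        simp [pvRefCols, h, PySem.List.pyGetD_zero_cons]
      · rw [show pvFcut pos gEnd gCut (ch :: t) s r = pvFcut pos gEnd gCut t (s + 1) (r + 1) from by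
          simp [pvFcut, h, hcc], ih (s + 1) (r + 1)]
        by_cases hmain : pos ≤ gCut ∧ gCut < gEnd ∧ r < gCut ∧
            gCut ≤ r + ((ch :: t).countP (fun x => x != '-') : Int)
        · have hne : r + 1 ≠ gCut := fun he => hcc ⟨he, by omega, by omega⟩
          have hmain' := hmain
          rw [hcnt2] at hmain'
          push_cast at hmain'
          have hcond2 : pos ≤ gCut ∧ gCut < gEnd ∧ r + 1 < gCut ∧
              gCut ≤ r + 1 + (t.countP (fun x => x != '-') : Int) := by omega
          rw [if_pos hcond2, if_pos hmain]
          rw [show pvRefCols (ch :: t) s = s :: pvRefCols t (s + 1) from by simp [pvRefCols, h]]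
          rw [pyGetD_cons_pos s _ (gCut - r - 1) (by omega) 0,
            show gCut - (r + 1) - 1 = gCut - r - 1 - 1 from by omega]
        · rw [if_neg hmain, if_neg (by
            rintro ⟨h1, h2, h3, h4⟩
            rw [hcnt2] at hmain
            push_cast at hmain
            exact hmain ⟨h1, h2, by omega, by omega⟩)]

lemma emitW_eq_emit (pos gEnd : Int) (t : List Char) : ∀ (r : Int),
    pvEmitW t (pos - r - 1).toNat (gEnd - r - 1).toNat = pvEmit pos gEnd t r := by
  induction t with
  | nil => intro r; simp [pvEmitW, pvEmit]
  | cons ch t ih =>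
    intro r
    by_cases h : ch = '-'
    · rw [show pvEmitW (ch :: t) (pos - r - 1).toNat (gEnd - r - 1).toNat
          = '-' :: pvEmitW t (pos - r - 1).toNat (gEnd - r - 1).toNat from by simp [pvEmitW, h],
        show pvEmit pos gEnd (ch :: t) r = '-' :: pvEmit pos gEnd t r from by simp [pvEmit, h],
        ih r]
    · rw [show pvEmitW (ch :: t) (pos - r - 1).toNat (gEnd - r - 1).toNat
          = (if (pos - r - 1).toNat = 0 ∧ 0 < (gEnd - r - 1).toNat then ch else '-')
            :: pvEmitW t ((pos - r - 1).toNat - 1) ((gEnd - r - 1).toNat - 1) from by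
            simp [pvEmitW, h],
        show pvEmit pos gEnd (ch :: t) r
          = (if pos ≤ r + 1 ∧ r + 1 < gEnd then ch else '-') :: pvEmit pos gEnd t (r + 1) from by
            simp [pvEmit, h]]
      rw [show (pos - r - 1).toNat - 1 = (pos - (r + 1) - 1).toNat from by omega,
        show (gEnd - r - 1).toNat - 1 = (gEnd - (r + 1) - 1).toNat from by omega, ih (r + 1)]
      congr 1
      by_cases hw : pos ≤ r + 1 ∧ r + 1 < gEnd
      · rw [if_pos (by omega), if_pos hw]
      · rw [if_neg (by omega), if_neg hw]

lemma mapCols (t : List Char) : ∀ (s : Int) (a b : Nat),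
    (PySem.List.enumerate t s).map
        (fun p => if p.1 ∈ ((pvRefCols t s).drop a).take (b - a) then p.2 else '-')
      = pvEmitW t a b := by
  induction t with
  | nil => intro s a b; simp [PySem.List.enumerate_nil, pvEmitW]
  | cons ch t ih =>
    intro s a b
    rw [PySem.List.enumerate_cons, List.map_cons]
    by_cases h : ch = '-'
    · subst h
      have hcols : pvRefCols ('-' :: t) s = pvRefCols t (s + 1) := by simp [pvRefCols]
      rw [hcols, show pvEmitW ('-' :: t) a b = '-' :: pvEmitW t a b from by simp [pvEmitW]]
      congr 1
      · simp
      · exact ih (s + 1) a b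
    · have hcols : pvRefCols (ch :: t) s = s :: pvRefCols t (s + 1) := by simp [pvRefCols, h]
      rw [hcols, show pvEmitW (ch :: t) a b
          = (if a = 0 ∧ 0 < b then ch else '-') :: pvEmitW t (a - 1) (b - 1) from by
          simp [pvEmitW, h]]
      congr 1
      · by_cases ha : a = 0
        · subst ha
          simp only [List.drop_zero, Nat.sub_zero]
          cases b with
          | zero => simp
          | succ b' => simp [List.take_succ_cons]
        · obtain ⟨a', rfl⟩ : ∃ a', a = a' + 1 := ⟨a - 1, by omega⟩
          rw [List.drop_succ_cons]
          have hnot : s ∉ ((pvRefCols t (s + 1)).drop a').take (b - (a' + 1)) := by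
            intro hm
            have := refCols_ge t (s + 1) s (List.mem_of_mem_drop (List.mem_of_mem_take hm))
            omega
          rw [if_neg hnot, if_neg (by omega : ¬((a' + 1 : Nat) = 0 ∧ 0 < b))]
      · by_cases ha : a = 0
        · subst ha
          rw [show (0 : Nat) - 1 = 0 from rfl, ← ih (s + 1) 0 (b - 1)]
          apply List.map_congr_left
          intro p hp
          obtain ⟨k, hk, hpk⟩ := (PySem.List.mem_enumerate_iff _ _ _).1 hp
          have hps : s + 1 ≤ p.1 := by rw [hpk]; simp
          cases b with
          | zero => simp
          | succ b' =>
            simp only [List.drop_zero, Nat.sub_zero, List.take_succ_cons, Nat.succ_sub_one]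
            have hne : p.1 ≠ s := by omega
            simp [List.mem_cons, hne]
        · obtain ⟨a', rfl⟩ : ∃ a', a = a' + 1 := ⟨a - 1, by omega⟩
          rw [List.drop_succ_cons, show b - (a' + 1) = (b - 1) - a' from by omega,
            show (a' + 1 : Nat) - 1 = a' from rfl]
          exact ih (s + 1) a' (b - 1)

lemma subAB (readL refL : List Char) (c : Int) : ∀ (rtt : List Char) (k : Int),
    pvSubA readL refL rtt (c + k) = pvSubB readL refL c (PySem.List.enumerate rtt k) := by
  intro rtt
  induction rtt with
  | nil => intro k; simp [pvSubA, pvSubB, PySem.List.enumerate_nil]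
  | cons rb rest ih =>
    intro k
    rw [PySem.List.enumerate_cons]
    simp only [pvSubA, pvSubB]
    by_cases h : PySem.List.pyGetD refL (c + k) '?' ≠ rb
    · rw [if_pos h, if_pos h]
    · rw [if_neg h, if_neg h, show c + k + 1 = c + (k + 1) from by omega, ih (k + 1)]

lemma subAB0 (readL refL : List Char) (c : Int) (rtt : List Char) :
    pvSubA readL refL rtt c = pvSubB readL refL c (PySem.List.enumerate rtt 0) := by
  simpa using subAB readL refL c rtt 0

lemma gA_eq (refL : List Char) (pos gEnd gCut : Int) :
    ((PySem.List.enumerate refL 0).foldl (pvStepA pos gEnd gCut) ([], -1, -1, true)).1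
      = (PySem.List.enumerate refL 0).map (fun p =>
          if p.1 ∈ PySem.Set.ofList (PySem.List.slice
              (((PySem.List.enumerate refL 0).filter (fun q => q.2 != '-')).map (fun q => q.1))
              (some (max pos 0)) (some (max gEnd 0)))
          then p.2 else '-') := by
  simp only [PySem.Set.mem_ofList]
  rw [foldA_true pos gEnd gCut refL 0 [] (-1) (-1), rta_eq,
    PySem.List.slice_toNat (pvRefCols refL 0) (a := max pos 0) (b := max gEnd 0)
      (le_max_right pos 0) (le_max_right gEnd 0),
    show (max pos 0).toNat = (pos - (-1) - 1).toNat from by omega,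
    show (max gEnd 0).toNat = (gEnd - (-1) - 1).toNat from by omega,
    mapCols refL 0, emitW_eq_emit pos gEnd refL (-1)]
  simp

lemma cA_eq (refL : List Char) (pos gEnd gCut : Int) :
    ((PySem.List.enumerate refL 0).foldl (pvStepA pos gEnd gCut) ([], -1, -1, true)).2.1
      = (if pos ≤ gCut ∧ gCut < gEnd ∧ 0 ≤ gCut ∧
            gCut < (((((PySem.List.enumerate refL 0).filter (fun q => q.2 != '-')).map
              (fun q => q.1)).length : Int))
         then PySem.List.pyGetD
            (((PySem.List.enumerate refL 0).filter (fun q => q.2 != '-')).map (fun q => q.1))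
            gCut 0
         else -1) := by
  rw [foldA_true pos gEnd gCut refL 0 [] (-1) (-1), rta_eq]
  simp only []
  rw [fcut_eq, len_refCols refL 0]
  by_cases h : pos ≤ gCut ∧ gCut < gEnd ∧ 0 ≤ gCut ∧
      gCut < ((refL.countP (fun x => x != '-') : Nat) : Int)
  · rw [if_pos (by push_cast at h ⊢; omega), if_pos h,
      show gCut - (-1) - 1 = gCut from by omega]
    simp
  · rw [if_neg (by push_cast at h ⊢; omega), if_neg h]
    simp

lemma main_eq (aligned_read aligned_ref : String) (gRNA_pos_in_ref : Int) (gRNA RTT : String)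
    (cas9_cut : Int) :
    PE_indel_sub aligned_read aligned_ref gRNA_pos_in_ref gRNA RTT cas9_cut
      = PE_indel_sub_alt aligned_read aligned_ref gRNA_pos_in_ref gRNA RTT cas9_cut := by
  simp only [PE_indel_sub, PE_indel_sub_alt]
  rw [gA_eq, cA_eq, subAB0]

-- ===== VERDICT (by name: the statement is the Claim_ definition above) =====
theorem PE_indel_sub_spec : Claim_equal_PE_indel_sub := by
  intro aligned_read aligned_ref gRNA_pos_in_ref gRNA RTT cas9_cut _ _
  unfold Spec_PE_indel_sub
  exact main_eq aligned_read aligned_ref gRNA_pos_in_ref gRNA RTT cas9_cut
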